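-- pv_equiv track=rewrite | github.com/LinyiHan1998/LCPractice | OA/amazon/countGameWonByGroup1.py | countGameWonByGroup1
-- ===== SOURCE A (Python) =====
-- def countGameWonByGroup1(group1,group2):
--     res = 0
--     n = len(group1)
--     for i in range(n):
--         for j in range(i+1,n):
--             if (group1[i] > group2[i] and group1[j] >= group2[j]) or (group1[i] >= group2[i] and group1[j] > group2[j]):
--                 res += 1
--     return res%(10**9 +7)
-- ===== SOURCE B (Python) =====
-- def countGameWonByGroup1(group1, group2):
--     # One pass: count strict wins w and ties e; winning pairs = C(w+e,2) - C(e,2).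
--     w = e = 0
--     for i in range(len(group1)):
--         a, b = group1[i], group2[i]
--         if a > b:
--             w += 1
--         elif a == b:
--             e += 1
--     t = w + e
--     return (t * (t - 1) // 2 - e * (e - 1) // 2) % (10**9 + 7)
-- ===== Notes on version B (the rewrite author's own statement) =====
-- stated objective: faster
-- what changed: Replaced the O(n^2) double loop over index pairs by a single pass counting wins w and ties e, returning the closed form C(w+e,2)-C(e,2) mod 10^9+7.
-- outside the precondition, e.g. on countGameWonByGroup1([5], []): A returns 0, B raises IndexError
import Mathlib
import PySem

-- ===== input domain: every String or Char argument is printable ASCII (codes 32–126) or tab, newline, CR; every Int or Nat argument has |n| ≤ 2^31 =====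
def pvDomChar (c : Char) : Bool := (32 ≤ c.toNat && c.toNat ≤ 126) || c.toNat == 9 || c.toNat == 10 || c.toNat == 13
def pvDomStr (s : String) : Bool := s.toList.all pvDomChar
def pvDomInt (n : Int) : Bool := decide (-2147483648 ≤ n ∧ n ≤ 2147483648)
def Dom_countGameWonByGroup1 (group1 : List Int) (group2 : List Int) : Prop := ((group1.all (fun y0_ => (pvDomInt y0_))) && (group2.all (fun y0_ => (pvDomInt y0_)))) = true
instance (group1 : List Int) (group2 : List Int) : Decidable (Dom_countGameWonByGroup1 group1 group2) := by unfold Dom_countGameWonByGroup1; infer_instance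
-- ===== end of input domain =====

-- B replaces A's O(n^2) double loop by a one-pass count of wins/ties and the closed form C(w+e,2)-C(e,2).

-- ===== PORT A =====
def countGameWonByGroup1 (group1 : List Int) (group2 : List Int) : Int :=
  let n : Int := (group1.length : Int)
  let res : Int :=
    (PySem.List.pyRange 0 n 1).foldl (fun res i =>
      (PySem.List.pyRange (i + 1) n 1).foldl (fun res j =>
        if (PySem.List.pyGetD group1 i 0 > PySem.List.pyGetD group2 i 0 ∧
            PySem.List.pyGetD group1 j 0 ≥ PySem.List.pyGetD group2 j 0) ∨
           (PySem.List.pyGetD group1 i 0 ≥ PySem.List.pyGetD group2 i 0 ∧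
            PySem.List.pyGetD group1 j 0 > PySem.List.pyGetD group2 j 0)
        then res + 1 else res) res) 0
  PySem.Int.mod res (10 ^ 9 + 7)

-- ===== PORT B =====
def countGameWonByGroup1_alt (group1 : List Int) (group2 : List Int) : Int :=
  let we : Int × Int :=
    (PySem.List.pyRange 0 (group1.length : Int) 1).foldl (fun we i =>
      if PySem.List.pyGetD group1 i 0 > PySem.List.pyGetD group2 i 0 then (we.1 + 1, we.2)
      else if PySem.List.pyGetD group1 i 0 = PySem.List.pyGetD group2 i 0 then (we.1, we.2 + 1)
      else we) (0, 0)
  let t : Int := we.1 + we.2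
  PySem.Int.mod (PySem.Int.floordiv (t * (t - 1)) 2 - PySem.Int.floordiv (we.2 * (we.2 - 1)) 2) (10 ^ 9 + 7)

-- ===== PRECONDITION & SPEC =====
-- Pre_ excludes calls with group2 shorter than group1: there both A and B index past group2's
-- end and raise IndexError whenever two or more games exist (A's return of 0 when group1 has at
-- most one element never reaches the indexing and is accidental).
def Pre_countGameWonByGroup1 (group1 : List Int) (group2 : List Int) : Prop :=
  group1.length ≤ group2.length
instance (group1 : List Int) (group2 : List Int) : Decidable (Pre_countGameWonByGroup1 group1 group2) := by unfold Pre_countGameWonByGroup1; infer_instance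
def pvWitness_countGameWonByGroup1 : List Int × List Int := ([3, 1, 2], [2, 1, 5])

def Spec_countGameWonByGroup1 (group1 : List Int) (group2 : List Int) (out : Int) : Prop := out = countGameWonByGroup1_alt group1 group2
instance (group1 : List Int) (group2 : List Int) (out : Int) : Decidable (Spec_countGameWonByGroup1 group1 group2 out) := by unfold Spec_countGameWonByGroup1; infer_instance

-- ===== CLAIM (what is proved, stated in full; the proofs are below) =====
def Claim_equal_countGameWonByGroup1 : Prop := ∀ (group1 : List Int) (group2 : List Int), Dom_countGameWonByGroup1 group1 group2 → Pre_countGameWonByGroup1 group1 group2 → Spec_countGameWonByGroup1 group1 group2 (countGameWonByGroup1 group1 group2)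

-- ===== LEMMAS AND PROOFS =====

-- A's pairwise condition, on the zipped pair of element pairs
abbrev pvPredP (x y : Int × Int) : Prop :=
  (x.1 > x.2 ∧ y.1 ≥ y.2) ∨ (x.1 ≥ x.2 ∧ y.1 > y.2)

-- A's pair count, structurally over the zipped list
def pvPC : List (Int × Int) → Int
  | [] => 0
  | x :: xs => ((xs.countP (fun y => decide (pvPredP x y)) : Nat) : Int) + pvPC xs

-- ≥-count splits into >-count plus =-count
theorem pvCount_ge_split (zs : List (Int × Int)) :
    zs.countP (fun y => decide (y.1 ≥ y.2)) =
      zs.countP (fun y => decide (y.1 > y.2)) + zs.countP (fun y => decide (y.1 = y.2)) := by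
  induction zs with
  | nil => simp
  | cons x xs ih =>
    simp only [List.countP_cons, ih, decide_eq_true_eq]
    split_ifs <;> omega

-- closed form for the pair count
theorem pvPC_closed (zs : List (Int × Int)) :
    2 * pvPC zs =
      ((zs.countP (fun y => decide (y.1 > y.2)) : Int) + (zs.countP (fun y => decide (y.1 = y.2)) : Int))
        * ((zs.countP (fun y => decide (y.1 > y.2)) : Int) + (zs.countP (fun y => decide (y.1 = y.2)) : Int) - 1)
      - (zs.countP (fun y => decide (y.1 = y.2)) : Int) * ((zs.countP (fun y => decide (y.1 = y.2)) : Int) - 1) := by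
  induction zs with
  | nil => simp [pvPC]
  | cons x xs ih =>
    rcases lt_trichotomy x.1 x.2 with h | h | h
    · have hc : xs.countP (fun y => decide (pvPredP x y)) = 0 := by
        apply List.countP_eq_zero.mpr
        intro y _
        simp only [decide_eq_true_eq, pvPredP]
        omega
      simp only [pvPC, List.countP_cons, hc]
      have h1 : (decide (x.1 > x.2)) = false := by simp; omega
      have h2 : (decide (x.1 = x.2)) = false := by simp; omega
      simp only [h1, h2]
      push_cast
      linear_combination ih
    · have hc : xs.countP (fun y => decide (pvPredP x y)) = xs.countP (fun y => decide (y.1 > y.2)) := by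
        apply List.countP_congr
        intro y _
        simp only [decide_eq_true_eq, pvPredP]
        omega
      simp only [pvPC, List.countP_cons, hc]
      have h1 : (decide (x.1 > x.2)) = false := by simp; omega
      have h2 : (decide (x.1 = x.2)) = true := by simp; omega
      simp only [h1, h2]
      push_cast
      linear_combination ih
    · have hc : xs.countP (fun y => decide (pvPredP x y)) = xs.countP (fun y => decide (y.1 ≥ y.2)) := by
        apply List.countP_congr
        intro y _
        simp only [decide_eq_true_eq, pvPredP]
        omega
      simp only [pvPC, List.countP_cons, hc, pvCount_ge_split]
      have h1 : (decide (x.1 > x.2)) = true := by simp; omega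
      have h2 : (decide (x.1 = x.2)) = false := by simp; omega
      simp only [h1, h2]
      push_cast
      linear_combination ih

-- A's outer loop over indices k..n computes pvPC of the k-th tail
theorem pvA_outer (zs : List (Int × Int)) (k : Nat) (res : Int) (hk : k ≤ zs.length) :
    (PySem.List.pyRange (k : Int) (zs.length : Int) 1).foldl
      (fun res i => res +
        (((zs.drop (i + 1).toNat).countP (fun y => decide (pvPredP (PySem.List.pyGetD zs i (0, 0)) y)) : Nat) : Int)) res
    = res + pvPC (zs.drop k) := by
  obtain ⟨m, hm⟩ : ∃ m, zs.length = k + m := ⟨zs.length - k, by omega⟩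
  clear hk
  induction m generalizing k res with
  | zero =>
    rw [PySem.List.pyRange_one_eq_nil (by omega)]
    rw [List.drop_of_length_le (by omega)]
    simp [pvPC]
  | succ m ih =>
    rw [PySem.List.pyRange_one_cons (by exact_mod_cast by omega : (k : Int) < (zs.length : Int))]
    simp only [List.foldl_cons]
    have h1 : ((k : Int) + 1) = ((k + 1 : Nat) : Int) := by push_cast; ring
    rw [h1, ih (k + 1) _ (by omega)]
    have hk' : k < zs.length := by omega
    have hget : PySem.List.pyGetD zs (k : Int) (0, 0) = zs[k] :=
      PySem.List.pyGetD_eq_getElem zs (0, 0) (by omega) (by exact_mod_cast hk') |>.trans (by simp)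
    have hdrop : zs.drop k = zs[k] :: zs.drop (k + 1) := List.drop_eq_getElem_cons hk'
    rw [hdrop]
    simp only [pvPC]
    simp only [Int.toNat_natCast, hget]
    ring

-- on a zipped index, pyGetD of the originals are the components
theorem pvGet_zip (g1 g2 : List Int) (h : g1.length ≤ g2.length) (i : Int)
    (h0 : 0 ≤ i) (hi : i < (g1.length : Int)) :
    PySem.List.pyGetD g1 i 0 = (PySem.List.pyGetD (g1.zip g2) i (0, 0)).1 ∧
    PySem.List.pyGetD g2 i 0 = (PySem.List.pyGetD (g1.zip g2) i (0, 0)).2 := by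
  have hz : (g1.zip g2).length = g1.length := by rw [List.length_zip]; omega
  have hiz : i < ((g1.zip g2).length : Int) := by rw [hz]; exact hi
  rw [PySem.List.pyGetD_eq_getElem g1 0 h0 hi,
      PySem.List.pyGetD_eq_getElem g2 0 h0 (by omega),
      PySem.List.pyGetD_eq_getElem (g1.zip g2) (0, 0) h0 hiz]
  have hlt : i.toNat < (g1.zip g2).length := by omega
  rw [List.getElem_zip (h := hlt)]
  exact ⟨rfl, rfl⟩

-- A computes pvPC of the zip, mod p
theorem countGameWonByGroup1_eq_pvPC (g1 g2 : List Int) (h : g1.length ≤ g2.length) :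
    countGameWonByGroup1 g1 g2 = PySem.Int.mod (pvPC (g1.zip g2)) (10 ^ 9 + 7) := by
  simp only [countGameWonByGroup1]
  have hz : (g1.zip g2).length = g1.length := by rw [List.length_zip]; omega
  have hmain :
      (PySem.List.pyRange 0 ((g1.length : Int)) 1).foldl (fun res i =>
        (PySem.List.pyRange (i + 1) ((g1.length : Int)) 1).foldl (fun res j =>
          if (PySem.List.pyGetD g1 i 0 > PySem.List.pyGetD g2 i 0 ∧
              PySem.List.pyGetD g1 j 0 ≥ PySem.List.pyGetD g2 j 0) ∨
             (PySem.List.pyGetD g1 i 0 ≥ PySem.List.pyGetD g2 i 0 ∧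
              PySem.List.pyGetD g1 j 0 > PySem.List.pyGetD g2 j 0)
          then res + 1 else res) res) 0
      = pvPC (g1.zip g2) := by
    rw [PySem.List.foldl_congr_mem _ _
      (fun res i => res +
        ((((g1.zip g2).drop (i + 1).toNat).countP
            (fun y => decide (pvPredP (PySem.List.pyGetD (g1.zip g2) i (0, 0)) y)) : Nat) : Int)) 0 ?_]
    · have := pvA_outer (g1.zip g2) 0 0 (by omega)
      simpa [hz] using this
    · intro res i hi
      rw [PySem.List.mem_pyRange_one] at hi
      rw [PySem.List.foldl_ite_add_one]
      congr 1
      have hcnt :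
          (PySem.List.pyRange (i + 1) ((g1.length : Int)) 1).countP
            (fun j => decide ((PySem.List.pyGetD g1 i 0 > PySem.List.pyGetD g2 i 0 ∧
              PySem.List.pyGetD g1 j 0 ≥ PySem.List.pyGetD g2 j 0) ∨
             (PySem.List.pyGetD g1 i 0 ≥ PySem.List.pyGetD g2 i 0 ∧
              PySem.List.pyGetD g1 j 0 > PySem.List.pyGetD g2 j 0)))
          = ((g1.zip g2).drop (i + 1).toNat).countP
              (fun y => decide (pvPredP (PySem.List.pyGetD (g1.zip g2) i (0, 0)) y)) := by
        obtain ⟨hgi1, hgi2⟩ := pvGet_zip g1 g2 h i hi.1 hi.2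
        have hrange : PySem.List.pyRange (i + 1) ((g1.length : Int)) 1
            = PySem.List.pyRange (i + 1) (((g1.zip g2).length : Int)) 1 := by rw [hz]
        rw [hrange, ← PySem.List.map_pyGetD_pyRange (g1.zip g2) (0, 0) (a := i + 1) (by omega),
            List.countP_map]
        apply List.countP_congr
        intro j hj
        rw [PySem.List.mem_pyRange_one] at hj
        obtain ⟨hgj1, hgj2⟩ := pvGet_zip g1 g2 h j (by omega) (by omega : j < (g1.length : Int))
        simp only [Function.comp, decide_eq_true_eq, pvPredP, hgi1, hgi2, hgj1, hgj2]
      rw [hcnt]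
  rw [hmain]

-- B computes the same counts via one pass over the zip
theorem countGameWonByGroup1_alt_eq (g1 g2 : List Int) (h : g1.length ≤ g2.length) :
    countGameWonByGroup1_alt g1 g2 = PySem.Int.mod (pvPC (g1.zip g2)) (10 ^ 9 + 7) := by
  simp only [countGameWonByGroup1_alt]
  have hz : (g1.zip g2).length = g1.length := by rw [List.length_zip]; omega
  set zs := g1.zip g2 with hzs
  have hwe :
      (PySem.List.pyRange 0 ((g1.length : Int)) 1).foldl (fun we i =>
        if PySem.List.pyGetD g1 i 0 > PySem.List.pyGetD g2 i 0 then (we.1 + 1, we.2)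
        else if PySem.List.pyGetD g1 i 0 = PySem.List.pyGetD g2 i 0 then (we.1, we.2 + 1)
        else we) ((0 : Int), (0 : Int))
      = ((zs.countP (fun y => decide (y.1 > y.2)) : Int), (zs.countP (fun y => decide (y.1 = y.2)) : Int)) := by
    rw [PySem.List.foldl_congr_mem _ _
      (fun we i =>
        (if (PySem.List.pyGetD zs i (0, 0)).1 > (PySem.List.pyGetD zs i (0, 0)).2 then we.1 + 1 else we.1,
         if (PySem.List.pyGetD zs i (0, 0)).1 = (PySem.List.pyGetD zs i (0, 0)).2 then we.2 + 1 else we.2)) _ ?_]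
    · have hr : PySem.List.pyRange 0 ((g1.length : Int)) 1 = PySem.List.pyRange 0 ((zs.length : Int)) 1 := by
        rw [hz]
      rw [hr]
      rw [PySem.List.foldl_pyRange_zero_pyGetD' zs (0, 0)
        (fun (we : Int × Int) (x : Int × Int) =>
          (if x.1 > x.2 then we.1 + 1 else we.1, if x.1 = x.2 then we.2 + 1 else we.2)) ((0 : Int), (0 : Int))]
      rw [PySem.List.foldl_prod_mk (f := fun (w : Int) (x : Int × Int) => if x.1 > x.2 then w + 1 else w)
        (g := fun (e : Int) (x : Int × Int) => if x.1 = x.2 then e + 1 else e)]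
      rw [PySem.List.foldl_ite_add_one (fun x : Int × Int => x.1 > x.2),
          PySem.List.foldl_ite_add_one (fun x : Int × Int => x.1 = x.2)]
      simp
    · intro we i hi
      rw [PySem.List.mem_pyRange_one] at hi
      obtain ⟨hg1, hg2⟩ := pvGet_zip g1 g2 h i hi.1 hi.2
      rw [← hzs] at hg1 hg2
      simp only [hg1, hg2]
      split_ifs <;> first | rfl | omega
  rw [hwe]
  simp only
  have hG := pvPC_closed zs
  set G : Int := (zs.countP (fun y => decide (y.1 > y.2)) : Int)
  set E : Int := (zs.countP (fun y => decide (y.1 = y.2)) : Int)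
  have e1 : Even ((G + E) * (G + E - 1)) := by
    have := Int.even_mul_succ_self (G + E - 1); simpa [mul_comm] using this
  have e2 : Even (E * (E - 1)) := by
    have := Int.even_mul_succ_self (E - 1); simpa [mul_comm] using this
  rw [PySem.Int.floordiv_eq_ediv_of_pos (by norm_num), PySem.Int.floordiv_eq_ediv_of_pos (by norm_num)]
  congr 1
  obtain ⟨a, ha⟩ := e1
  obtain ⟨b, hb⟩ := e2
  omega

-- ===== VERDICT (by name: the statement is the Claim_ definition above) =====
theorem countGameWonByGroup1_spec : Claim_equal_countGameWonByGroup1 := by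
  intro g1 g2 _ hpre
  unfold Spec_countGameWonByGroup1
  rw [countGameWonByGroup1_eq_pvPC g1 g2 hpre, countGameWonByGroup1_alt_eq g1 g2 hpre]
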